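-- pv_equiv track=rewrite | github.com/TristianSellers/Mr.TAI | backend/services/ocr.py | _snap_quarter_token
-- ===== SOURCE A (Python) =====
-- from typing import Optional, Dict, TYPE_CHECKING, Any, List, Tuple, Set
--
-- _QUARTER_MAP_IN  = {"1ST":"1st","2ND":"2nd","3RD":"3rd","4TH":"4th","OT":"OT"}
--
-- _Q_FROM_QDIGIT   = {"1":"1st","2":"2nd","3":"3rd","4":"4th"}
--
-- _ALLOWED_Q_TOKENS = ["1ST","2ND","3RD","4TH","OT","Q1","Q2","Q3","Q4","1st","2nd","3rd","4th","ot","q1","q2","q3","q4"]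
--
-- def _lev(a: str, b: str) -> int:
--     la, lb = len(a), len(b)
--     dp = list(range(lb+1))
--     for i in range(1, la+1):
--         prev = dp[0]
--         dp[0] = i
--         ca = a[i-1]
--         for j in range(1, lb+1):
--             temp = dp[j]
--             cost = 0 if ca == b[j-1] else 1
--             dp[j] = min(dp[j] + 1, dp[j-1] + 1, prev + cost)
--             prev = temp
--     return dp[lb]
--
-- def _snap_quarter_token(s: str) -> Optional[str]:
--     if not s:
--         return None
--     s = s.strip()
--     best = None
--     best_d = 99
--     for tok in _ALLOWED_Q_TOKENS:
--         d = _lev(s, tok)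
--         if d < best_d:
--             best, best_d = tok, d
--     if best is not None and best_d <= 2:
--         up = best.upper()
--         if up in _QUARTER_MAP_IN: return _QUARTER_MAP_IN[up]
--         if up.startswith("Q") and len(up) == 2 and up[1] in "1234":
--             return _Q_FROM_QDIGIT[up[1]]
--     return None
-- ===== SOURCE B (Python) =====
-- from typing import Optional
--
-- _QUARTER_MAP_IN  = {"1ST":"1st","2ND":"2nd","3RD":"3rd","4TH":"4th","OT":"OT"}
--
-- _Q_FROM_QDIGIT   = {"1":"1st","2":"2nd","3":"3rd","4":"4th"}
--
-- _ALLOWED_Q_TOKENS = ["1ST","2ND","3RD","4TH","OT","Q1","Q2","Q3","Q4","1st","2nd","3rd","4th","ot","q1","q2","q3","q4"]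
--
-- def _ed(a: str, b: str, i: int, j: int) -> int:
--     """Edit distance of the length-i prefix of a and the length-j prefix of b,
--     by direct top-down recursion (no DP table; inputs are short)."""
--     if i == 0:
--         return j
--     if j == 0:
--         return i
--     cost = 0 if a[i-1] == b[j-1] else 1
--     return min(_ed(a, b, i-1, j) + 1, _ed(a, b, i, j-1) + 1, _ed(a, b, i-1, j-1) + cost)
--
-- def _to_label(tok: str) -> Optional[str]:
--     up = tok.upper()
--     if up in _QUARTER_MAP_IN:
--         return _QUARTER_MAP_IN[up]
--     if len(up) == 2 and up[0] == "Q" and up[1] in "1234":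
--         return _Q_FROM_QDIGIT[up[1]]
--     return None
--
-- def _snap_quarter_token(s: str) -> Optional[str]:
--     if not s:
--         return None
--     t = s.strip()
--     # every allowed token has length <= 3, so for len(t) > 5 every distance exceeds 2
--     if len(t) > 5:
--         return None
--     # search by increasing radius: the first token found at the smallest radius
--     # is exactly the first distance-minimal token, and the radius is capped at 2
--     for k in (0, 1, 2):
--         for tok in _ALLOWED_Q_TOKENS:
--             if _ed(t, tok, len(t), len(tok)) == k:
--                 return _to_label(tok)
--     return None
-- ===== Notes on version B (the rewrite author's own statement) =====
-- stated objective: faster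
-- what changed: B drops the DP table and the running-best scan entirely: it rejects inputs whose stripped length exceeds 5 up front (any distance to a length-<=3 token then exceeds the threshold 2), computes edit distance by direct top-down recursion on prefix lengths, and finds the answer by increasing-radius search (first token at distance 0, then 1, then 2) instead of tracking a best/best_d pair over all tokens.
import Mathlib
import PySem

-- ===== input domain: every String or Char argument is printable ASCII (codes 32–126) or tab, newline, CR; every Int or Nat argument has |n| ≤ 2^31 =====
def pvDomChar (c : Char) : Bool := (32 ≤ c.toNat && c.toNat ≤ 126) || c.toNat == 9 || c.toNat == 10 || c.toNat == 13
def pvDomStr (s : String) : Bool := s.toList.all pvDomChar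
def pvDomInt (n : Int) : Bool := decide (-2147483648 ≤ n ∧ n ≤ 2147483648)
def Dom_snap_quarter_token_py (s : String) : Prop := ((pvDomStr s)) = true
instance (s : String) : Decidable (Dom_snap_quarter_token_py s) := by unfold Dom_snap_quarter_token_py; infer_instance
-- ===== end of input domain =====

-- B replaces A's rolling-array DP over all tokens with a running best by: a length gate
-- (inputs longer than 5 cannot be within distance 2 of any length-≤3 token), edit distance
-- by direct top-down recursion on prefix lengths, and an increasing-radius search (first
-- token at distance 0, then 1, then 2) instead of tracking a best/best_d pair.

-- module constants
def pvQuarterMapIn : PySem.Dict String String :=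
  ⟨[("1ST","1st"),("2ND","2nd"),("3RD","3rd"),("4TH","4th"),("OT","OT")]⟩
def pvQFromQDigit : PySem.Dict String String :=
  ⟨[("1","1st"),("2","2nd"),("3","3rd"),("4","4th")]⟩
def pvAllowedQTokens : List String :=
  ["1ST","2ND","3RD","4TH","OT","Q1","Q2","Q3","Q4","1st","2nd","3rd","4th","ot","q1","q2","q3","q4"]

-- ===== PORT A =====
-- _lev: bottom-up DP with a rolling array dp and carried prev, transliterated;
-- indices i-1, j-1, j are always in range, so pyGetD/pySetD are exact here.
def levA (a b : List Char) : Int :=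
  let la : Int := PySem.List.len a
  let lb : Int := PySem.List.len b
  let dp : List Int := PySem.List.pyRange 0 (lb + 1) 1
  let dp :=
    (PySem.List.pyRange 1 (la + 1) 1).foldl (fun dp i =>
      let prev := PySem.List.pyGetD dp 0 0
      let dp := PySem.List.pySetD dp 0 i
      let ca := PySem.List.pyGetD a (i - 1) ' '
      ((PySem.List.pyRange 1 (lb + 1) 1).foldl (fun (st : List Int × Int) j =>
          let temp := PySem.List.pyGetD st.1 j 0
          let cost : Int := if ca == PySem.List.pyGetD b (j - 1) ' ' then 0 else 1
          (PySem.List.pySetD st.1 j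
            (min (min (PySem.List.pyGetD st.1 j 0 + 1) (PySem.List.pyGetD st.1 (j - 1) 0 + 1))
              (st.2 + cost)), temp))
        (dp, prev)).1) dp
  PySem.List.pyGetD dp lb 0

def snap_quarter_token_py (s : String) : Option String :=
  if s == "" then none
  else
    match pvAllowedQTokens.foldl (fun (st : Option String × Int) tok =>
        if levA (PySem.Str.strip s).toList tok.toList < st.2 then
          (some tok, levA (PySem.Str.strip s).toList tok.toList)
        else st) (none, 99) with
    | (none, _) => none
    | (some best, best_d) =>
      if best_d ≤ 2 then
        match PySem.Dict.get? pvQuarterMapIn (PySem.Str.upper best) with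
        | some v => some v
        | none =>
          if PySem.Str.startswith (PySem.Str.upper best) "Q"
              && (PySem.Str.len (PySem.Str.upper best) == 2) then
            match PySem.Str.pyGet? (PySem.Str.upper best) 1 with
            | some c =>
              -- up[1] in "1234", then dict lookup (present whenever this guard holds)
              if PySem.Str.isIn (String.ofList [c]) "1234" then
                PySem.Dict.get? pvQFromQDigit (String.ofList [c])
              else none
            | none => none  -- unreachable: len up = 2 was just checked
          else none
      else none

-- ===== PORT B =====
-- _ed: top-down recursion on prefix lengths (i, j); a[i-1]/b[j-1] are in range whenever
-- this is called with i ≤ |a|, j ≤ |b|, so List.getD is exact there.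
def edB (a b : List Char) : Nat → Nat → Int
  | 0, j => (j : Int)
  | i + 1, 0 => (i : Int) + 1
  | i + 1, j + 1 =>
    let c : Int := if a.getD i ' ' == b.getD j ' ' then 0 else 1
    min (min (edB a b i (j + 1) + 1) (edB a b (i + 1) j + 1)) (edB a b i j + c)
  termination_by i j => i + j

-- _to_label
def toLabelB (tok : String) : Option String :=
  match PySem.Dict.get? pvQuarterMapIn (PySem.Str.upper tok) with
  | some v => some v
  | none =>
    if PySem.Str.len (PySem.Str.upper tok) == 2 then
      match PySem.Str.pyGet? (PySem.Str.upper tok) 0, PySem.Str.pyGet? (PySem.Str.upper tok) 1 with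
      | some c0, some c1 =>
        if (String.ofList [c0] == "Q") && PySem.Str.isIn (String.ofList [c1]) "1234" then
          PySem.Dict.get? pvQFromQDigit (String.ofList [c1])
        else none
      | _, _ => none  -- unreachable: len up = 2 was just checked
    else none

-- the inner 'for tok in _ALLOWED_Q_TOKENS: if _ed(...) == k: return ...' early-return loop
def findTokB (t : List Char) (k : Int) : Option String :=
  pvAllowedQTokens.find? (fun tok => edB t tok.toList t.length tok.toList.length == k)

def snap_quarter_token_py_alt (s : String) : Option String :=
  if s == "" then none
  else if PySem.Str.len (PySem.Str.strip s) > 5 then none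
  else
    match findTokB (PySem.Str.strip s).toList 0 with
    | some tok => toLabelB tok
    | none =>
      match findTokB (PySem.Str.strip s).toList 1 with
      | some tok => toLabelB tok
      | none =>
        match findTokB (PySem.Str.strip s).toList 2 with
        | some tok => toLabelB tok
        | none => none

-- ===== PRECONDITION & SPEC =====
def Spec_snap_quarter_token_py (s : String) (out : Option String) : Prop := out = snap_quarter_token_py_alt s
instance (s : String) (out : Option String) : Decidable (Spec_snap_quarter_token_py s out) := by unfold Spec_snap_quarter_token_py; infer_instance

-- ===== CLAIM (what is proved, stated in full; the proofs are below) =====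
def Claim_equal_snap_quarter_token_py : Prop := ∀ (s : String), Dom_snap_quarter_token_py s → Spec_snap_quarter_token_py s (snap_quarter_token_py s)

-- ===== LEMMAS AND PROOFS =====

-- small facts about edB (via its equation lemmas; edB is well-founded recursion)
theorem edB_zero_left (a b : List Char) (j : Nat) : edB a b 0 j = (j : Int) := by
  simp [edB]

theorem edB_zero_right (a b : List Char) (i : Nat) : edB a b i 0 = (i : Int) := by
  cases i <;> simp [edB]

theorem edB_succ (a b : List Char) (i j : Nat) :
    edB a b (i + 1) (j + 1)
      = min (min (edB a b i (j + 1) + 1) (edB a b (i + 1) j + 1))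
          (edB a b i j + (if a.getD i ' ' == b.getD j ' ' then 0 else 1)) := by
  simp [edB]

-- distance bounds: 0 ≤ ed(i,j) and i - j ≤ ed(i,j)
theorem edB_bounds (a b : List Char) : ∀ i j : Nat, 0 ≤ edB a b i j ∧ (i : Int) - (j : Int) ≤ edB a b i j
  | 0, j => by rw [edB_zero_left]; omega
  | i + 1, 0 => by rw [edB_zero_right]; push_cast; omega
  | i + 1, j + 1 => by
    have h1 := edB_bounds a b i (j + 1)
    have h2 := edB_bounds a b (i + 1) j
    have h3 := edB_bounds a b i j
    rw [edB_succ]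
    rcases (by split <;> simp : (if a.getD i ' ' == b.getD j ' ' then (0 : Int) else 1) = 0 ∨
        (if a.getD i ' ' == b.getD j ' ' then (0 : Int) else 1) = 1) with h | h <;>
      rw [h] <;> push_cast at * <;> omega
  termination_by i j => i + j

-- rows of the DP table
def rowE (a b : List Char) (i : Nat) : List Int :=
  (List.range (b.length + 1)).map (fun j => edB a b i j)

-- the rolling array mid-row: entries ≤ k already updated to row p+1, the rest still row p
def mixRow (a b : List Char) (p k : Nat) : List Int :=
  (List.range (b.length + 1)).map (fun j => if j ≤ k then edB a b (p + 1) j else edB a b p j)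

theorem set_map_range (f : Nat → Int) (n k : Nat) (v : Int) (_hk : k < n) :
    ((List.range n).map f).set k v = (List.range n).map (fun j => if j = k then v else f j) := by
  apply List.ext_getElem
  · simp
  · intro i h1 h2
    simp only [List.getElem_set, List.getElem_map, List.getElem_range]
    by_cases hik : k = i
    · subst hik; simp
    · rw [if_neg hik, if_neg (fun h => hik h.symm)]

-- the inner loop of A: one row of the DP, processed left to right
theorem inner_loop (a b : List Char) (p : Nat) :
    ∀ k : Nat, k ≤ b.length →
    (PySem.List.pyRange 1 ((k : Int) + 1) 1).foldl (fun (st : List Int × Int) j =>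
        (PySem.List.pySetD st.1 j
          (min (min (PySem.List.pyGetD st.1 j 0 + 1) (PySem.List.pyGetD st.1 (j - 1) 0 + 1))
            (st.2 + (if PySem.List.pyGetD a (((p : Int) + 1) - 1) ' ' == PySem.List.pyGetD b (j - 1) ' ' then 0 else 1))),
         PySem.List.pyGetD st.1 j 0))
      (mixRow a b p 0, (p : Int))
      = (mixRow a b p k, edB a b p k) := by
  intro k
  induction k with
  | zero =>
    intro _
    rw [show ((0 : Nat) : Int) + 1 = 1 by simp, PySem.List.pyRange_one_eq_nil le_rfl]
    rw [List.foldl_nil, edB_zero_right]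
  | succ k ih =>
    intro hk
    have hk' : k ≤ b.length := by omega
    rw [show ((k + 1 : Nat) : Int) + 1 = ((k : Int) + 1) + 1 by push_cast; ring]
    rw [PySem.List.pyRange_one_succ_right (by omega), List.foldl_append, ih hk', List.foldl_cons,
      List.foldl_nil]
    have hcast : ((k : Int) + 1) = ((k + 1 : Nat) : Int) := by push_cast; ring
    have hidx : ((k : Int) + 1) - 1 = ((k : Nat) : Int) := by ring
    have hca : ((p : Int) + 1) - 1 = ((p : Nat) : Int) := by ring
    have hget1 : PySem.List.pyGetD (mixRow a b p k) ((k : Int) + 1) 0 = edB a b p (k + 1) := by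
      rw [hcast, PySem.List.pyGetD_natCast]
      unfold mixRow
      rw [PySem.List.getD_map_range _ _ _ _ (by omega)]
      rw [if_neg (by omega)]
    have hget2 : PySem.List.pyGetD (mixRow a b p k) (((k : Int) + 1) - 1) 0 = edB a b (p + 1) k := by
      rw [hidx, PySem.List.pyGetD_natCast]
      unfold mixRow
      rw [PySem.List.getD_map_range _ _ _ _ (by omega)]
      rw [if_pos le_rfl]
    have hcost : (if PySem.List.pyGetD a (((p : Int) + 1) - 1) ' ' == PySem.List.pyGetD b (((k : Int) + 1) - 1) ' ' then (0 : Int) else 1)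
        = (if a.getD p ' ' == b.getD k ' ' then (0 : Int) else 1) := by
      rw [hca, hidx, PySem.List.pyGetD_natCast, PySem.List.pyGetD_natCast]
    simp only [hget1, hget2, hcost]
    refine Prod.ext ?_ rfl
    show PySem.List.pySetD (mixRow a b p k) ((k : Int) + 1)
        (min (min (edB a b p (k + 1) + 1) (edB a b (p + 1) k + 1))
          (edB a b p k + (if a.getD p ' ' == b.getD k ' ' then (0 : Int) else 1))) = mixRow a b p (k + 1)
    rw [← edB_succ, hcast, PySem.List.pySetD_natCast]
    unfold mixRow
    rw [set_map_range _ _ _ _ (by omega)]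
    apply List.map_congr_left
    intro j hj
    rcases Nat.lt_trichotomy j (k + 1) with h | h | h
    · rw [if_neg (by omega), if_pos (by omega), if_pos (by omega)]
    · subst h; simp
    · rw [if_neg (by omega), if_neg (by omega), if_neg (by omega)]

-- the outer loop of A: i rows processed
theorem outer_loop (a b : List Char) :
    ∀ i : Nat, i ≤ a.length →
    (PySem.List.pyRange 1 ((i : Int) + 1) 1).foldl (fun dp i =>
        ((PySem.List.pyRange 1 ((b.length : Int) + 1) 1).foldl (fun (st : List Int × Int) j =>
            (PySem.List.pySetD st.1 j
              (min (min (PySem.List.pyGetD st.1 j 0 + 1) (PySem.List.pyGetD st.1 (j - 1) 0 + 1))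
                (st.2 + (if PySem.List.pyGetD a (i - 1) ' ' == PySem.List.pyGetD b (j - 1) ' ' then 0 else 1))),
             PySem.List.pyGetD st.1 j 0))
          (PySem.List.pySetD dp 0 i, PySem.List.pyGetD dp 0 0)).1)
      (PySem.List.pyRange 0 ((b.length : Int) + 1) 1)
      = rowE a b i := by
  intro i
  induction i with
  | zero =>
    intro _
    rw [show ((0 : Nat) : Int) + 1 = 1 by simp, PySem.List.pyRange_one_eq_nil le_rfl, List.foldl_nil]
    rw [PySem.List.pyRange_one 0 ((b.length : Int) + 1)]
    unfold rowE
    rw [show (((b.length : Int) + 1) - 0).toNat = b.length + 1 by omega]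
    apply List.map_congr_left
    intro j hj
    rw [edB_zero_left]
    ring
  | succ p ih =>
    intro hp
    have hp' : p ≤ a.length := by omega
    rw [show ((p + 1 : Nat) : Int) + 1 = ((p : Int) + 1) + 1 by push_cast; ring]
    rw [show PySem.List.pyRange 1 (((p : Int) + 1) + 1) 1
        = PySem.List.pyRange 1 ((p : Int) + 1) 1 ++ [(p : Int) + 1]
      from PySem.List.pyRange_one_succ_right (by omega)]
    rw [List.foldl_append, ih hp', List.foldl_cons, List.foldl_nil]
    have hprev : PySem.List.pyGetD (rowE a b p) 0 0 = (p : Int) := by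
      rw [PySem.List.pyGetD_zero]
      unfold rowE
      rw [PySem.List.getD_map_range _ _ _ _ (by omega), edB_zero_right]
    have hset : PySem.List.pySetD (rowE a b p) 0 ((p : Int) + 1) = mixRow a b p 0 := by
      rw [PySem.List.pySetD_of_nonneg _ _ le_rfl, Int.toNat_zero]
      unfold rowE mixRow
      rw [set_map_range _ _ _ _ (by omega)]
      apply List.map_congr_left
      intro j hj
      rcases eq_or_ne j 0 with h | h
      · subst h
        rw [if_pos rfl, if_pos le_rfl, edB_zero_right]
        push_cast; ring
      · rw [if_neg h, if_neg (by omega)]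
    rw [hset, hprev, inner_loop a b p b.length le_rfl]
    show mixRow a b p b.length = rowE a b (p + 1)
    unfold rowE mixRow
    apply List.map_congr_left
    intro j hj
    rw [if_pos (by simp at hj; omega)]

-- A's DP helper tabulates exactly B's recurrence
theorem lev_eq (a b : List Char) : levA a b = edB a b a.length b.length := by
  simp only [levA, PySem.List.len_eq]
  rw [outer_loop a b a.length le_rfl]
  rw [PySem.List.pyGetD_natCast]
  unfold rowE
  rw [PySem.List.getD_map_range _ _ _ _ (by omega)]

-- Python's min(toks, key=k) keeps the first minimum; peel one element off the front.
theorem min?_cons (key : String → Int) (r : List String) :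
    ∀ (y : String), PySem.List.min? (y :: r) key
      = match PySem.List.min? r key with
        | none => some y
        | some m => if key m < key y then some m else some y := by
  induction r with
  | nil => intro y; rfl
  | cons z r' ih =>
    intro y
    have step : PySem.List.min? (y :: z :: r') key
        = PySem.List.min? ((if key z < key y then z else y) :: r') key := by
      by_cases h : key z < key y <;> simp [PySem.List.min?, h]
    rw [step, ih (if key z < key y then z else y), ih z]
    cases hr : PySem.List.min? r' key with
    | none => by_cases h2 : key z < key y <;> simp [h2]
    | some m =>
      by_cases h1 : key m < key z <;> by_cases h2 : key z < key y <;>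
        by_cases h3 : key m < key y <;> simp [h1, h2, h3] <;> omega

-- A's strict-< running-best scan computes the first key-minimum (Python's min with key).
theorem scan_foldl (key : String → Int) (toks : List String) (st : Option String × Int) :
    toks.foldl (fun st tok => if key tok < st.2 then (some tok, key tok) else st) st
      = match PySem.List.min? toks key with
        | none => st
        | some m => if key m < st.2 then (some m, key m) else st := by
  induction toks generalizing st with
  | nil => rfl
  | cons y r ih =>
    rw [List.foldl_cons, ih, min?_cons key r y]
    cases hr : PySem.List.min? r key with
    | none => by_cases hy : key y < st.2 <;> simp [hy]
    | some m =>
      by_cases hy : key y < st.2 <;> by_cases h1 : key m < key y <;>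
        by_cases h2 : key m < st.2 <;> simp [hy, h1, h2] <;> omega

-- the first key-minimum is the first element whose key equals the minimal key
theorem find_first_min (key : String → Int) :
    ∀ (toks : List String) (m : String), PySem.List.min? toks key = some m →
      toks.find? (fun x => key x == key m) = some m := by
  intro toks
  induction toks with
  | nil => intro m h; simp [PySem.List.min?] at h
  | cons y r ih =>
    intro m h
    rw [min?_cons key r y] at h
    cases hr : PySem.List.min? r key with
    | none =>
      rw [hr] at h
      dsimp only at h
      cases h
      simp [List.find?]
    | some m' =>
      rw [hr] at h
      dsimp only at h
      by_cases hlt : key m' < key y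
      · rw [if_pos hlt] at h
        cases h
        rw [List.find?_cons,
          show (key y == key m) = false from by simp only [beq_eq_false_iff_ne]; omega]
        exact ih m hr
      · rw [if_neg hlt] at h
        cases h
        simp [List.find?]

-- both final token→label mappings agree on every allowed token
theorem tail_eq (m : String) (hm : m ∈ pvAllowedQTokens) :
    (match PySem.Dict.get? pvQuarterMapIn (PySem.Str.upper m) with
     | some v => some v
     | none =>
       if PySem.Str.startswith (PySem.Str.upper m) "Q"
           && (PySem.Str.len (PySem.Str.upper m) == 2) then
         match PySem.Str.pyGet? (PySem.Str.upper m) 1 with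
         | some c =>
           if PySem.Str.isIn (String.ofList [c]) "1234" then
             PySem.Dict.get? pvQFromQDigit (String.ofList [c])
           else none
         | none => none
       else none) = toLabelB m := by
  fin_cases hm <;> decide

-- every allowed token has length ≤ 3
theorem tok_len_le (m : String) (hm : m ∈ pvAllowedQTokens) : m.toList.length ≤ 3 := by
  fin_cases hm <;> decide

-- ===== VERDICT (by name: the statement is the Claim_ definition above) =====
theorem snap_quarter_token_py_spec : Claim_equal_snap_quarter_token_py := by
  intro s _
  unfold Spec_snap_quarter_token_py snap_quarter_token_py snap_quarter_token_py_alt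
  by_cases hs : s == ""
  · rw [if_pos hs, if_pos hs]
  · rw [if_neg hs, if_neg hs]
    set t := (PySem.Str.strip s).toList with ht
    set key : String → Int := fun tok => edB t tok.toList t.length tok.toList.length with hkey
    have hfun : (fun (st : Option String × Int) tok =>
        if levA t tok.toList < st.2 then (some tok, levA t tok.toList) else st)
        = fun (st : Option String × Int) tok => if key tok < st.2 then (some tok, key tok) else st := by
      funext st tok
      simp only [lev_eq, hkey]
    rw [hfun, scan_foldl]
    cases hmin : PySem.List.min? pvAllowedQTokens key with
    | none =>
      rw [PySem.List.min?_eq_none_iff] at hmin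
      exact absurd hmin (by decide)
    | some m =>
      have hmem : m ∈ pvAllowedQTokens := PySem.List.min?_mem hmin
      have hisMin := PySem.List.min?_isMin hmin
      have hnn : 0 ≤ key m := (edB_bounds t m.toList t.length m.toList.length).1
      have hlb : (t.length : Int) - (m.toList.length : Int) ≤ key m :=
        (edB_bounds t m.toList t.length m.toList.length).2
      have hml : m.toList.length ≤ 3 := tok_len_le m hmem
      have hlen5 : PySem.Str.len (PySem.Str.strip s) = (t.length : Int) := by
        rw [ht, PySem.Str.len_eq]
      dsimp only
      by_cases hL : PySem.Str.len (PySem.Str.strip s) > 5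
      · -- B's length gate: every token is at distance ≥ 3, so A returns none too
        rw [if_pos hL]
        have h3 : 3 ≤ key m := by
          rw [hlen5] at hL
          have : (m.toList.length : Int) ≤ 3 := by exact_mod_cast hml
          omega
        by_cases h99 : key m < 99
        · rw [if_pos h99]
          dsimp only
          rw [if_neg (by omega)]
        · rw [if_neg h99]
      · rw [if_neg hL]
        -- helper facts for the staged search
        have hfind_lt : ∀ k : Int, k < key m →
            findTokB t k = none := by
          intro k hk
          unfold findTokB
          rw [List.find?_eq_none]
          intro x hx
          simp only [beq_iff_eq]
          intro hc
          have hle := hisMin x hx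
          have hx2 : key x = edB t x.toList t.length x.toList.length := rfl
          rw [hx2, hc] at hle
          omega
        have hfind_eq : findTokB t (key m) = some m := by
          unfold findTokB
          exact find_first_min key pvAllowedQTokens m hmin
        by_cases h2 : key m ≤ 2
        · -- minimal distance ≤ 2: both return the label of the first minimal token
          rw [if_pos (by omega : key m < 99)]
          dsimp only
          rw [if_pos h2]
          have hB : (match findTokB t 0 with
              | some tok => toLabelB tok
              | none =>
                match findTokB t 1 with
                | some tok => toLabelB tok
                | none =>
                  match findTokB t 2 with
                  | some tok => toLabelB tok
                  | none => none) = toLabelB m := by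
            rcases (by omega : key m = 0 ∨ key m = 1 ∨ key m = 2) with h | h | h
            · rw [← h, hfind_eq]
            · rw [hfind_lt 0 (by omega), ← h, hfind_eq]
            · rw [hfind_lt 0 (by omega), hfind_lt 1 (by omega), ← h, hfind_eq]
          rw [hB]
          exact tail_eq m hmem
        · -- minimal distance ≥ 3: both return none
          have hB : ∀ k : Int, k ≤ 2 → findTokB t k = none := fun k hk =>
            hfind_lt k (by omega)
          rw [hB 0 (by omega), hB 1 (by omega), hB 2 (by omega)]
          by_cases h99 : key m < 99
          · rw [if_pos h99]
            dsimp only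
            rw [if_neg h2]
          · rw [if_neg h99]
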